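-- pv_equiv track=rewrite | github.com/DVBeckwitt/ra_sim | ra_sim/path_config.py | _escape_backslashes_in_double_quoted_yaml
-- ===== SOURCE A (Python) =====
-- def _escape_backslashes_in_double_quoted_yaml(text: str) -> str:
--     """Escape ``\\`` inside double-quoted YAML scalars.
--
--     This allows Windows paths like:
--     ``"C:\\Users\\Kenpo\\...\\file.osc"``
--     to be accepted even when users do not manually escape backslashes.
--     """
--
--     out_chars = []
--     in_double = False
--     prev = ""
--     for ch in text:
--         if ch == '"' and prev != "\\":
--             in_double = not in_double
--             out_chars.append(ch)
--         elif in_double and ch == "\\":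
--             out_chars.append("\\\\")
--         else:
--             out_chars.append(ch)
--         prev = ch
--     return "".join(out_chars)
-- ===== SOURCE B (Python) =====
-- def _escape_backslashes_in_double_quoted_yaml(text: str) -> str:
--     """Escape ``\\`` inside double-quoted YAML scalars.
--
--     Split the text at every quote, re-merge the pieces whose separating
--     quote was backslash-escaped, double the backslashes of the segments
--     at odd index (the in-quote ones) and rejoin with ``"``.
--     """
--     segs = []
--     for piece in text.split('"'):
--         if segs and segs[-1].endswith("\\"):
--             segs[-1] = segs[-1] + '"' + piece
--         else:
--             segs.append(piece)
--     out = []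
--     for i, seg in enumerate(segs):
--         if i % 2 == 1:
--             seg = "".join("\\\\" if c == "\\" else c for c in seg)
--         out.append(seg)
--     return '"'.join(out)
-- ===== Notes on version B (the rewrite author's own statement) =====
-- stated objective: alternative
-- what changed: Replaces A's per-character in_double/prev state machine with a split-merge-transform pipeline: split the text at every double-quote, re-merge pieces whose separating quote was backslash-escaped, double the backslashes of the odd-indexed (in-quote) segments, and rejoin with a double-quote between segments.
import Mathlib
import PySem

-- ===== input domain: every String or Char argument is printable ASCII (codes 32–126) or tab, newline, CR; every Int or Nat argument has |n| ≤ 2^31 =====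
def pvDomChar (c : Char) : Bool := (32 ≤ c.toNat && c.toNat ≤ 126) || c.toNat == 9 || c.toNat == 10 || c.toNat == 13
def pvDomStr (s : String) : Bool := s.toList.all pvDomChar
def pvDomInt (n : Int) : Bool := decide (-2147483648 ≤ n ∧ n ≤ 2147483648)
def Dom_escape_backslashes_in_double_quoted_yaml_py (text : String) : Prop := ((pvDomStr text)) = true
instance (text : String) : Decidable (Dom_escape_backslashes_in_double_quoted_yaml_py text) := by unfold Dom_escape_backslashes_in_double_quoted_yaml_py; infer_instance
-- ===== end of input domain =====

-- B replaces A's per-character state machine by a split/merge/transform pipeline: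
-- split at quotes, re-merge escaped ones, double backslashes in odd segments, rejoin ('alternative').

-- ===== PORT A =====
-- A's out_chars buffer is ported as a flat List Char ("".join at the end = String.ofList,
-- exact since only single chars and "\\\\" are appended); prev is ported as Option Char
-- (none = the initial "", exact since prev is otherwise always the previous single char).
def pvAStep (st : List Char × Bool × Option Char) (ch : Char) : List Char × Bool × Option Char :=
  match st with
  | (out, in_double, prev) =>
    if ch = '"' ∧ prev ≠ some '\\' then (out ++ [ch], !in_double, some ch)
    else if in_double = true ∧ ch = '\\' then (out ++ ['\\', '\\'], in_double, some ch)
    else (out ++ [ch], in_double, some ch)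

def escape_backslashes_in_double_quoted_yaml_py (text : String) : String :=
  String.ofList (text.toList.foldl pvAStep ([], false, none)).1

-- ===== PORT B =====
-- one iteration of Source B's first loop: `if segs and segs[-1].endswith("\\"): segs[-1] += '"' + piece else: segs.append(piece)`
def pvBMergeStep (segs : List (List Char)) (piece : List Char) : List (List Char) :=
  match segs.getLast? with
  | some lastSeg =>
    if PySem.Chars.endswith lastSeg ['\\'] then segs.dropLast ++ [lastSeg ++ '"' :: piece]
    else segs ++ [piece]
  | none => segs ++ [piece]

-- `"".join("\\\\" if c == "\\" else c for c in seg)`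
def pvBDouble (seg : List Char) : List Char :=
  PySem.Chars.join [] (seg.map (fun c => if c = '\\' then ['\\', '\\'] else [c]))

def escape_backslashes_in_double_quoted_yaml_py_alt (text : String) : String :=
  let pieces := PySem.Chars.splitOn text.toList ['"']
  let segs := pieces.foldl pvBMergeStep []
  let out := (PySem.List.enumerate segs 0).foldl
    (fun acc (p : Int × List Char) =>
      acc ++ [if PySem.Int.mod p.1 2 = 1 then pvBDouble p.2 else p.2]) []
  String.ofList (PySem.Chars.join ['"'] out)

-- ===== PRECONDITION & SPEC =====
def Spec_escape_backslashes_in_double_quoted_yaml_py (text : String) (out : String) : Prop := out = escape_backslashes_in_double_quoted_yaml_py_alt text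
instance (text : String) (out : String) : Decidable (Spec_escape_backslashes_in_double_quoted_yaml_py text out) := by unfold Spec_escape_backslashes_in_double_quoted_yaml_py; infer_instance

-- ===== CLAIM (what is proved, stated in full; the proofs are below) =====
def Claim_equal_escape_backslashes_in_double_quoted_yaml_py : Prop := ∀ (text : String), Dom_escape_backslashes_in_double_quoted_yaml_py text → Spec_escape_backslashes_in_double_quoted_yaml_py text (escape_backslashes_in_double_quoted_yaml_py text)

-- ===== LEMMAS AND PROOFS =====

-- the common denominator: A's state machine written as structural recursion
-- (ind = in_double, pbs = "prev is a backslash")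
def pvSRec : List Char → Bool → Bool → List Char
  | [], _, _ => []
  | c :: cs, ind, pbs =>
    if c = '"' ∧ pbs = false then '"' :: pvSRec cs (!ind) false
    else if ind = true ∧ c = '\\' then '\\' :: '\\' :: pvSRec cs ind true
    else c :: pvSRec cs ind (decide (c = '\\'))

-- structural split at every '"'
def pvSplit : List Char → List (List Char)
  | [] => [[]]
  | c :: cs => if c = '"' then [] :: pvSplit cs else (pvSplit cs).modifyHead (c :: ·)

-- merged segments (split at UNESCAPED quotes only), tracking "prev is backslash"
def pvMS : List Char → Bool → List (List Char)
  | [], _ => [[]]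
  | c :: cs, pbs =>
    if c = '"' ∧ pbs = false then [] :: pvMS cs false
    else (pvMS cs (decide (c = '\\'))).modifyHead (c :: ·)

-- Source B's first loop as recursion on the piece list, with the open segment as accumulator
def pvMRec : List Char → List (List Char) → List (List Char)
  | cur, [] => [cur]
  | cur, p :: ps =>
    if PySem.Chars.endswith cur ['\\'] then pvMRec (cur ++ '"' :: p) ps
    else cur :: pvMRec p ps

-- Source B's first loop as recursion on the TEXT, with the open segment as accumulator
def pvBMerge : List Char → List Char → List (List Char)
  | cur, [] => [cur]
  | cur, c :: cs =>
    if c = '"' then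
      if PySem.Chars.endswith cur ['\\'] then pvBMerge (cur ++ ['"']) cs
      else cur :: pvBMerge [] cs
    else pvBMerge (cur ++ [c]) cs

-- the alternating transform of Source B's second loop
def pvAltMap : Bool → List (List Char) → List (List Char)
  | _, [] => []
  | ind, s :: ss => (if ind then pvBDouble s else s) :: pvAltMap (!ind) ss

theorem pvSplit_ne_nil (cs : List Char) : pvSplit cs ≠ [] := by
  induction cs with
  | nil => simp [pvSplit]
  | cons c cs ih =>
    simp only [pvSplit]
    split
    · simp
    · cases h : pvSplit cs with
      | nil => exact absurd h ih
      | cons a t => simp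

theorem pvMS_ne_nil (cs : List Char) (pbs : Bool) : pvMS cs pbs ≠ [] := by
  induction cs generalizing pbs with
  | nil => simp [pvMS]
  | cons c cs ih =>
    simp only [pvMS]
    split
    · simp
    · cases h : pvMS cs (decide (c = '\\')) with
      | nil => exact absurd h (ih _)
      | cons a t => simp

-- A's foldl = pvSRec
theorem pvA_eq_sRec (cs : List Char) (out : List Char) (ind : Bool) (prev : Option Char) :
    (cs.foldl pvAStep (out, ind, prev)).1 = out ++ pvSRec cs ind (decide (prev = some '\\')) := by
  induction cs generalizing out ind prev with
  | nil => simp [pvSRec]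
  | cons c cs ih =>
    simp only [List.foldl_cons, pvAStep, pvSRec]
    by_cases h1 : c = '"' ∧ prev ≠ some '\\'
    · have hd : decide (prev = some '\\') = false := by
        simp [h1.2]
      rw [if_pos h1]
      rw [ih]
      simp [h1.1, hd]
    · rw [if_neg h1]
      by_cases h2 : ind = true ∧ c = '\\'
      · rw [if_pos h2, ih]
        have hq : ¬ (c = '"' ∧ decide (prev = some '\\') = false) := by
          intro hc; exact absurd (hc.1 ▸ h2.2) (by decide)
        simp [h2.1, h2.2]
      · rw [if_neg h2, ih]
        by_cases hq : c = '"'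
        · have hp : prev = some '\\' := by
            by_contra hp; exact h1 ⟨hq, hp⟩
          have : ¬ (c = '"' ∧ decide (prev = some '\\') = false) := by simp [hp]
          simp [hq, hp]
        · simp [hq, h2]

-- splitOn's fuel loop = pvSplit
theorem pvSplitOn_go_eq (fuel : Nat) (l cur : List Char) (acc : List (List Char)) (h : l.length ≤ fuel) :
    PySem.Chars.splitOn.go ['"'] fuel l cur acc
      = acc.reverse ++ (pvSplit l).modifyHead (cur.reverse ++ ·) := by
  induction fuel generalizing l cur acc with
  | zero =>
    have : l = [] := by cases l <;> simp_all
    subst this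
    simp [PySem.Chars.splitOn.go, pvSplit]
  | succ fuel ih =>
    cases l with
    | nil => simp [PySem.Chars.splitOn.go, pvSplit]
    | cons c rest =>
      by_cases hc : c = '"'
      · have hpre : List.isPrefixOf ['"'] (c :: rest) = true := by
          simp [List.isPrefixOf, hc]
        rw [PySem.Chars.splitOn.go, if_pos hpre, ih _ _ _ (by simpa using h)]
        cases hms : pvSplit rest with
        | nil => exact absurd hms (pvSplit_ne_nil rest)
        | cons a t => simp [pvSplit, hc, hms]
      · have hpre : List.isPrefixOf ['"'] (c :: rest) = false := by
          simp [List.isPrefixOf]; exact fun hh => absurd hh.symm hc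
        rw [PySem.Chars.splitOn.go, if_neg (by simp [hpre]), ih _ _ _ (by simpa using h)]
        cases hms : pvSplit rest with
        | nil => exact absurd hms (pvSplit_ne_nil rest)
        | cons a t => simp [pvSplit, hc, hms]

theorem pvSplitOn_eq (cs : List Char) : PySem.Chars.splitOn cs ['"'] = pvSplit cs := by
  have := pvSplitOn_go_eq (cs.length + 1) cs [] [] (by omega)
  rw [PySem.Chars.splitOn, this]
  cases hms : pvSplit cs with
  | nil => exact absurd hms (pvSplit_ne_nil cs)
  | cons a t => simp

-- Source B's first loop (foldl) = pvMRec
theorem pvFoldl_merge_eq (ps : List (List Char)) (done : List (List Char)) (cur : List Char) :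
    (ps.foldl pvBMergeStep (done ++ [cur])) = done ++ pvMRec cur ps := by
  induction ps generalizing done cur with
  | nil => simp [pvMRec]
  | cons p ps ih =>
    simp only [List.foldl_cons]
    have hstep : pvBMergeStep (done ++ [cur]) p =
        if PySem.Chars.endswith cur ['\\'] = true then done ++ [cur ++ '"' :: p]
        else (done ++ [cur]) ++ [p] := by
      simp only [pvBMergeStep, List.getLast?_concat]
      split <;> simp
    rw [hstep]
    by_cases he : PySem.Chars.endswith cur ['\\'] = true
    · rw [if_pos he, ih]
      simp [pvMRec, he]
    · rw [if_neg he, ih]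
      simp [pvMRec, he]

-- pvMRec over the split pieces = pvBMerge
theorem pvMRec_split (cs : List Char) : ∀ (cur p : List Char) (ps : List (List Char)),
    pvSplit cs = p :: ps → pvMRec (cur ++ p) ps = pvBMerge cur cs := by
  induction cs with
  | nil =>
    intro cur p ps h
    simp only [pvSplit] at h
    injection h with h1 h2
    subst h1; subst h2
    simp [pvMRec, pvBMerge]
  | cons c cs ih =>
    intro cur p ps h
    obtain ⟨p', ps', hps'⟩ := List.exists_cons_of_ne_nil (pvSplit_ne_nil cs)
    by_cases hc : c = '"'
    · rw [pvSplit, if_pos hc, hps'] at h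
      injection h with h1 h2
      subst h1; subst h2
      simp only [pvBMerge, if_pos hc, List.append_nil]
      rw [pvMRec]
      by_cases he : PySem.Chars.endswith cur ['\\'] = true
      · rw [if_pos he, if_pos he, ← ih (cur ++ ['"']) p' ps' hps']
        simp
      · rw [if_neg he, if_neg he, ← ih [] p' ps' hps']
        simp
    · rw [pvSplit, if_neg hc, hps'] at h
      simp only [List.modifyHead] at h
      injection h with h1 h2
      subst h1; subst h2
      rw [pvBMerge, if_neg hc, ← ih (cur ++ [c]) p' ps' hps']
      simp

theorem pvEndswith_concat (l : List Char) (c : Char) :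
    PySem.Chars.endswith (l ++ [c]) ['\\'] = decide (c = '\\') := by
  simp only [PySem.Chars.endswith, List.isSuffixOf, List.reverse_append]
  by_cases h : c = '\\' <;> simp [h, List.isPrefixOf]
  intro hh; exact h hh.symm

theorem pvBMerge_eq_MS (cs : List Char) : ∀ (cur : List Char),
    pvBMerge cur cs = (pvMS cs (PySem.Chars.endswith cur ['\\'])).modifyHead (cur ++ ·) := by
  induction cs with
  | nil => intro cur; simp [pvBMerge, pvMS]
  | cons c cs ih =>
    intro cur
    by_cases hc : c = '"'
    · subst hc
      by_cases he : PySem.Chars.endswith cur ['\\'] = true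
      · rw [pvBMerge, if_pos rfl, if_pos he, ih]
        rw [pvMS, if_neg (by simp [he]), pvEndswith_concat]
        cases hms : pvMS cs (decide ('"' = '\\')) with
        | nil => exact absurd hms (pvMS_ne_nil _ _)
        | cons a t => simp
      · rw [pvBMerge, if_pos rfl, if_neg he, ih]
        have he' : PySem.Chars.endswith cur ['\\'] = false := by
          cases hq : PySem.Chars.endswith cur ['\\'] <;> simp_all
        rw [pvMS, if_pos ⟨rfl, he'⟩]
        have : PySem.Chars.endswith ([] : List Char) ['\\'] = false := by decide
        rw [this]
        cases hms : pvMS cs false with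
        | nil => exact absurd hms (pvMS_ne_nil _ _)
        | cons a t => simp
    · rw [pvBMerge, if_neg hc, ih, pvEndswith_concat]
      rw [pvMS, if_neg (by intro hh; exact hc hh.1)]
      cases hms : pvMS cs (decide (c = '\\')) with
      | nil => exact absurd hms (pvMS_ne_nil _ _)
      | cons a t => simp

theorem pvBDouble_nil : pvBDouble [] = [] := by decide

theorem pvBDouble_cons (c : Char) (h : List Char) :
    pvBDouble (c :: h) = (if c = '\\' then ['\\', '\\'] else [c]) ++ pvBDouble h := by
  cases h <;> by_cases hc : c = '\\' <;> simp [pvBDouble, PySem.Chars.join, List.intercalate, hc]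

theorem pvAltMap_ne_nil (ind : Bool) (l : List (List Char)) (h : l ≠ []) :
    pvAltMap ind l ≠ [] := by
  cases l with
  | nil => exact absurd rfl h
  | cons a t => simp [pvAltMap]

theorem pvJoin_cons (x : List Char) (xs : List (List Char)) (h : xs ≠ []) :
    PySem.Chars.join ['"'] (x :: xs) = x ++ '"' :: PySem.Chars.join ['"'] xs := by
  cases xs with
  | nil => exact absurd rfl h
  | cons y ys => simp [PySem.Chars.join, List.intercalate]

theorem pvJoin_modifyHead (p : List Char) (l : List (List Char)) (h : l ≠ []) :
    PySem.Chars.join ['"'] (l.modifyHead (p ++ ·)) = p ++ PySem.Chars.join ['"'] l := by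
  cases l with
  | nil => exact absurd rfl h
  | cons x xs =>
    cases xs with
    | nil => simp [PySem.Chars.join, List.intercalate]
    | cons y ys =>
      rw [List.modifyHead, pvJoin_cons (p ++ x) (y :: ys) (by simp),
        pvJoin_cons x (y :: ys) (by simp), List.append_assoc]

theorem pvAltMap_modifyHead (ind : Bool) (c : Char) (l : List (List Char)) (h : l ≠ []) :
    pvAltMap ind (l.modifyHead (c :: ·))
      = (pvAltMap ind l).modifyHead
          ((if ind = true ∧ c = '\\' then ['\\', '\\'] else [c]) ++ ·) := by
  cases l with
  | nil => exact absurd rfl h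
  | cons a t =>
    cases ind <;> by_cases hc : c = '\\' <;>
      simp [pvAltMap, pvBDouble_cons, hc]

-- joining the alternately transformed merged segments = pvSRec
theorem pvJoin_altMap (cs : List Char) : ∀ (ind pbs : Bool),
    PySem.Chars.join ['"'] (pvAltMap ind (pvMS cs pbs)) = pvSRec cs ind pbs := by
  induction cs with
  | nil =>
    intro ind pbs
    cases ind <;> simp [pvMS, pvAltMap, pvSRec, pvBDouble_nil]
  | cons c cs ih =>
    intro ind pbs
    by_cases hq : c = '"' ∧ pbs = false
    · rw [pvMS, if_pos hq, pvSRec, if_pos hq]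
      have hne := pvAltMap_ne_nil (!ind) _ (pvMS_ne_nil cs false)
      rw [pvAltMap, pvJoin_cons _ _ hne, ih]
      cases ind <;> simp [pvBDouble_nil]
    · rw [pvMS, if_neg hq]
      rw [pvAltMap_modifyHead ind c _ (pvMS_ne_nil _ _)]
      rw [pvJoin_modifyHead _ _ (pvAltMap_ne_nil _ _ (pvMS_ne_nil _ _))]
      rw [ih]
      by_cases hb : ind = true ∧ c = '\\'
      · rw [if_pos hb, pvSRec, if_neg (by intro hh; exact absurd (hh.1 ▸ hb.2) (by decide)), if_pos hb]
        simp [hb.2]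
      · rw [if_neg hb, pvSRec, if_neg hq, if_neg hb]
        simp

-- Source B's second loop = pvAltMap
theorem pvEnum_altMap (ss : List (List Char)) : ∀ (k : Nat),
    (PySem.List.enumerate ss (k : Int)).map
        (fun (p : Int × List Char) => if PySem.Int.mod p.1 2 = 1 then pvBDouble p.2 else p.2)
      = pvAltMap (decide (k % 2 = 1)) ss := by
  induction ss with
  | nil => intro k; simp [PySem.List.enumerate, pvAltMap]
  | cons s ss ih =>
    intro k
    rw [PySem.List.enumerate_cons, pvAltMap]
    have hcast : ((k : Int) + 1) = ((k + 1 : Nat) : Int) := by push_cast; ring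
    have hmod : PySem.Int.mod (k : Int) 2 = ((k % 2 : Nat) : Int) := by
      exact_mod_cast PySem.Int.mod_natCast k 2
    have hcond : (PySem.Int.mod (k : Int) 2 = 1) ↔ (k % 2 = 1) := by
      rw [hmod]; exact_mod_cast Iff.rfl
    have hflip : decide ((k + 1) % 2 = 1) = !decide (k % 2 = 1) := by
      rcases Nat.mod_two_eq_zero_or_one k with h | h <;> simp [Nat.add_mod, h]
    simp only [List.map_cons]
    rw [hcast, ih (k + 1), hflip]
    by_cases h1 : k % 2 = 1
    · rw [if_pos (hcond.mpr h1)]; simp [h1]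
    · rw [if_neg (fun hh => h1 (hcond.mp hh))]; simp [h1]

-- ===== VERDICT (by name: the statement is the Claim_ definition above) =====
theorem escape_backslashes_in_double_quoted_yaml_py_spec : Claim_equal_escape_backslashes_in_double_quoted_yaml_py := by
  intro text _
  unfold Spec_escape_backslashes_in_double_quoted_yaml_py
  rw [escape_backslashes_in_double_quoted_yaml_py, escape_backslashes_in_double_quoted_yaml_py_alt]
  rw [pvA_eq_sRec]
  simp only [List.nil_append]
  rw [pvSplitOn_eq]
  obtain ⟨p, ps, hps⟩ := List.exists_cons_of_ne_nil (pvSplit_ne_nil text.toList)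
  rw [hps, List.foldl_cons]
  have hfirst : pvBMergeStep [] p = [] ++ [p] := by simp [pvBMergeStep]
  rw [hfirst, pvFoldl_merge_eq, List.nil_append]
  have hmerge : pvMRec p ps = pvMS text.toList false := by
    have h1 : pvMRec ([] ++ p) ps = pvBMerge [] text.toList := pvMRec_split text.toList [] p ps hps
    rw [List.nil_append] at h1
    rw [h1, pvBMerge_eq_MS]
    have : PySem.Chars.endswith ([] : List Char) ['\\'] = false := by decide
    rw [this]
    cases hms : pvMS text.toList false with
    | nil => exact absurd hms (pvMS_ne_nil _ _)
    | cons a t => simp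
  rw [hmerge]
  rw [PySem.List.foldl_append_singleton_eq_map]
  have h0 : (0 : Int) = ((0 : Nat) : Int) := rfl
  rw [h0, pvEnum_altMap]
  have : decide ((0 : Nat) % 2 = 1) = false := by decide
  rw [this]
  simp only [List.nil_append]
  rw [pvJoin_altMap]
  have hd : decide ((none : Option Char) = some '\\') = false := by decide
  rw [hd]
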